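-- pv_equiv track=rewrite | github.com/huhji-elha/Daily_Coding_Practice | programmers/124나라_nosolved.py | solution
-- ===== SOURCE A (Python) =====
-- def solution(n):
--     _124 = {"1", "2", "4"}
--     i = 0
--     num = 0
--     while True:
--         if set(str(num)) < _124:
--             i += 1
--         if i == n:
--             return num
--         num += 1
-- ===== SOURCE B (Python) =====
-- def _digits124(k):
--     # little-endian digits (over the alphabet 1,2,4) of the k-th number
--     # whose decimal digits all lie in {1,2,4} (k = 0 -> empty / value 0):
--     # these numbers are in bijection with base-3 bijective numeration.
--     out = []
--     while k > 0:
--         k, r = divmod(k - 1, 3)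
--         out.append(1 if r == 0 else (2 if r == 1 else 4))
--     return out
--
--
-- def solution(n):
--     # Enumerate only the numbers whose digits are in {1,2,4} (via their
--     # base-3 style index k), instead of scanning every integer; keep those
--     # that do not use all three digits, exactly as A's strict-subset test.
--     count = 0
--     k = 0
--     while count < n:
--         k += 1
--         d = _digits124(k)
--         if not (1 in d and 2 in d and 4 in d):
--             count += 1
--     val = 0
--     for d in reversed(_digits124(k)):
--         val = 10 * val + d
--     return val
-- ===== Notes on version B (the rewrite author's own statement) =====
-- stated objective: faster
-- what changed: Instead of scanning every integer 0,1,2,... and testing its decimal digit set, B enumerates only the numbers whose digits lie in {1,2,4} via their base-3-style index (bijective base-3 with digits mapped to 1,2,4), skipping the ones that use all three digits, so only ~3^d candidates are visited instead of ~10^d.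
import Mathlib
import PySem

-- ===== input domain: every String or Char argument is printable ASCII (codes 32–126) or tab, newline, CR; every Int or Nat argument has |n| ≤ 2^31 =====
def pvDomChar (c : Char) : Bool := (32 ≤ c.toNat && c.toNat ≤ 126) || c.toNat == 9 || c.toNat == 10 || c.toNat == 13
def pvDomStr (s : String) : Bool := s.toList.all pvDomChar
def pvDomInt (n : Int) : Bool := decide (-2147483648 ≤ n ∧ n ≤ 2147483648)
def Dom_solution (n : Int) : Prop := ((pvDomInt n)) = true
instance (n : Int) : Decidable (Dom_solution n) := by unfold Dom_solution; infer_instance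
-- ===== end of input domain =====

-- B replaces A's scan of every integer by an enumeration of only the numbers whose decimal
-- digits lie in {1,2,4} (indexed in base-3 style); objective: faster (asymptotic).

-- ===== PORT A =====
-- set(str(num)) < {"1","2","4"} — Python's `<` on sets is PROPER subset (issubset ∧ ¬ equal);
-- the character list of str(num) is PySem.Int.toChars num.
def validA (num : Int) : Bool :=
  let s := PySem.Set.ofList (PySem.Int.toChars num)
  let t := PySem.Set.ofList ['1', '2', '4']
  PySem.Set.issubset s t && !PySem.Set.equal s t

-- A's `while True:` loop; the fuel argument only makes the recursion total (`none` = fuel ran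
-- out); `solution` supplies fuel 10^(n+1), proven sufficient below (the loop returns after at
-- most answer+1 < 10^(n+1) iterations).
def aLoop (n : Int) : Nat → Int → Int → Option Int
  | 0, _, _ => none
  | f + 1, i, num =>
    let i' := if validA num then i + 1 else i
    if i' = n then some num else aLoop n f i' (num + 1)

def solution (n : Int) : Int := (aLoop n (10 ^ (n.toNat + 1)) 0 0).getD 0

-- ===== PORT B =====
-- Source B's `while k > 0: k, r = divmod(k - 1, 3); out.append(1 if r == 0 else (2 if r == 1 else 4))`;
-- divmod with the positive literal divisor 3 never raises.
def digits124 (k : Int) : List Int :=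
  if 0 < k then
    (if PySem.Int.mod (k - 1) 3 = 0 then (1 : Int)
     else if PySem.Int.mod (k - 1) 3 = 1 then 2 else 4) ::
      digits124 (PySem.Int.floordiv (k - 1) 3)
  else []
termination_by k.toNat
decreasing_by
  rw [PySem.Int.floordiv_eq_ediv_of_pos (by omega)]
  have h1 : (k - 1) / 3 ≤ k - 1 := Int.ediv_le_self _ (by omega)
  have h2 : 0 ≤ (k - 1) / 3 := Int.ediv_nonneg (by omega) (by omega)
  omega

-- Source B's main `while count < n:` loop, fueled the same way as A's.
def bLoop (n : Int) : Nat → Int → Int → Option Int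
  | 0, _, _ => none
  | f + 1, count, k =>
    if count < n then
      let k' := k + 1
      let d := digits124 k'
      if 1 ∈ d ∧ 2 ∈ d ∧ 4 ∈ d then bLoop n f count k'
      else bLoop n f (count + 1) k'
    else some k

-- `val = 0; for d in reversed(ds): val = 10 * val + d`
def toInt124 (ds : List Int) : Int := ds.reverse.foldl (fun v d => 10 * v + d) 0

def solution_alt (n : Int) : Int :=
  match bLoop n (10 ^ (n.toNat + 1)) 0 0 with
  | some k => toInt124 (digits124 k)
  | none => 0

-- ===== PRECONDITION & SPEC =====
-- Pre_ excludes n < 0, on which Python A's `while True` loop never returns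
-- (i counts up from 0 and can never equal a negative n).
def Pre_solution (n : Int) : Prop := 0 ≤ n
instance (n : Int) : Decidable (Pre_solution n) := by unfold Pre_solution; infer_instance
def pvWitness_solution : Int := (5)

def Spec_solution (n : Int) (out : Int) : Prop := out = solution_alt n
instance (n : Int) (out : Int) : Decidable (Spec_solution n out) := by unfold Spec_solution; infer_instance

-- ===== CLAIM (what is proved, stated in full; the proofs are below) =====
def Claim_equal_solution : Prop := ∀ (n : Int), Dom_solution n → Pre_solution n → Spec_solution n (solution n)

-- ===== LEMMAS AND PROOFS =====

-- Nat-side model of B's digit lists: `to124N k` is the little-endian {1,2,4}-digit list of the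
-- k-th decimal number all of whose digits lie in {1,2,4}; `vN k` is that number.
def to124N : Nat → List Nat
  | 0 => []
  | k + 1 => (if k % 3 = 0 then 1 else if k % 3 = 1 then 2 else 4) :: to124N (k / 3)
decreasing_by exact Nat.lt_succ_of_le (Nat.div_le_self k 3)

def vN (k : Nat) : Nat := Nat.ofDigits 10 (to124N k)

-- index of a {1,2,4}-digit list (left inverse of to124N)
def idxN : List Nat → Nat
  | [] => 0
  | d :: t => (if d = 1 then 1 else if d = 2 then 2 else 3) + 3 * idxN t

theorem to124N_succ (k : Nat) :
    to124N (k + 1) = (if k % 3 = 0 then 1 else if k % 3 = 1 then 2 else 4) :: to124N (k / 3) := by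
  rw [to124N]

abbrev goodN (k : Nat) : Prop :=
  ¬(1 ∈ to124N k ∧ 2 ∈ to124N k ∧ 4 ∈ to124N k)

theorem to124N_mem {k d : Nat} (h : d ∈ to124N k) : d = 1 ∨ d = 2 ∨ d = 4 := by
  induction k using to124N.induct with
  | case1 => simp [to124N] at h
  | case2 k ih =>
    rw [to124N] at h
    rcases List.mem_cons.1 h with h1 | h2
    · subst h1; split_ifs <;> simp
    · exact ih h2

theorem vN_zero : vN 0 = 0 := by simp [vN, to124N]

theorem digits_vN (k : Nat) : Nat.digits 10 (vN k) = to124N k := by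
  refine Nat.digits_ofDigits 10 (by norm_num) _ (fun l hl => ?_) (fun h => ?_)
  · rcases to124N_mem hl with h | h | h <;> omega
  · rcases to124N_mem (List.getLast_mem h) with h | h | h <;> omega

theorem vN_succ (k : Nat) :
    vN (k + 1) = (if k % 3 = 0 then 1 else if k % 3 = 1 then 2 else 4) + 10 * vN (k / 3) := by
  rw [vN, to124N, Nat.ofDigits_cons]; rfl

theorem vN_lt_succ (k : Nat) : vN k < vN (k + 1) := by
  induction k using Nat.strong_induction_on with
  | _ k ih =>
    match k with
    | 0 => simp [vN_zero, vN_succ]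
    | k' + 1 =>
      rw [vN_succ k', vN_succ (k' + 1)]
      have h3 : k' % 3 = 0 ∨ k' % 3 = 1 ∨ k' % 3 = 2 := by omega
      rcases h3 with h | h | h
      · have e1 : (k' + 1) % 3 = 1 := by omega
        have e2 : (k' + 1) / 3 = k' / 3 := by omega
        rw [e1, e2]; simp [h]
      · have e1 : (k' + 1) % 3 = 2 := by omega
        have e2 : (k' + 1) / 3 = k' / 3 := by omega
        rw [e1, e2]; simp [h]
      · have e1 : (k' + 1) % 3 = 0 := by omega
        have e2 : (k' + 1) / 3 = k' / 3 + 1 := by omega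
        have hq : k' / 3 < k' + 1 := by omega
        have := ih (k' / 3) hq
        rw [e1, e2]
        simp only [h]
        norm_num
        omega

theorem vN_strictMono : StrictMono vN := strictMono_nat_of_lt_succ vN_lt_succ

theorem to124N_idxN {L : List Nat} (h : ∀ d ∈ L, d = 1 ∨ d = 2 ∨ d = 4) :
    to124N (idxN L) = L := by
  induction L with
  | nil => simp [idxN, to124N]
  | cons d t ih =>
    have hd := h d (List.mem_cons_self)
    have ht := fun x hx => h x (List.mem_cons_of_mem _ hx)
    rcases hd with h1 | h1 | h1 <;> subst h1 <;>
      simp only [idxN, if_true, if_false] <;> norm_num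
    · have e : 1 + 3 * idxN t = (3 * idxN t) + 1 := by ring
      rw [e, to124N]
      have : 3 * idxN t % 3 = 0 := by omega
      have h2 : 3 * idxN t / 3 = idxN t := by omega
      simp [this, h2, ih ht]
    · have e : 2 + 3 * idxN t = (3 * idxN t + 1) + 1 := by ring
      rw [e, to124N]
      have h1 : (3 * idxN t + 1) % 3 = 1 := by omega
      have h2 : (3 * idxN t + 1) / 3 = idxN t := by omega
      simp [h1, h2, ih ht]
    · have e : 3 + 3 * idxN t = (3 * idxN t + 2) + 1 := by ring
      rw [e, to124N]
      have h1 : (3 * idxN t + 2) % 3 = 2 := by omega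
      have h2 : (3 * idxN t + 2) / 3 = idxN t := by omega
      simp [h1, h2, ih ht]

theorem digits124_natCast (k : Nat) :
    digits124 (k : Int) = (to124N k).map (Nat.cast : Nat → Int) := by
  induction k using Nat.strong_induction_on with
  | _ k ih =>
    match k with
    | 0 => rw [digits124]; simp [to124N]
    | k' + 1 =>
      rw [digits124]
      have hpos : (0 : Int) < ((k' + 1 : Nat) : Int) := by positivity
      rw [if_pos hpos]
      have e : ((k' + 1 : Nat) : Int) - 1 = (k' : Int) := by push_cast; ring
      rw [e]
      have hm : PySem.Int.mod (k' : Int) 3 = ((k' % 3 : Nat) : Int) := by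
        exact_mod_cast PySem.Int.mod_natCast k' 3
      have hf : PySem.Int.floordiv (k' : Int) 3 = ((k' / 3 : Nat) : Int) := by
        exact_mod_cast PySem.Int.floordiv_natCast k' 3
      rw [hm, hf, ih (k' / 3) (by omega), to124N_succ]
      simp only [List.map_cons]
      have h3 : k' % 3 = 0 ∨ k' % 3 = 1 ∨ k' % 3 = 2 := by omega
      rcases h3 with h | h | h
      · rw [h]; norm_num
      · rw [h]; norm_num
      · rw [h]; norm_num

-- bridging Nat.toDigits (used by PySem.Int.toChars) with Nat.digits
theorem toDigitsCore_eq :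
    ∀ (f m : Nat) (acc : List Char), 0 < m → m < f →
      Nat.toDigitsCore 10 f m acc = ((Nat.digits 10 m).map Nat.digitChar).reverse ++ acc := by
  intro f
  induction f with
  | zero => intro m acc h1 h2; omega
  | succ f ih =>
    intro m acc hm hf
    rw [Nat.toDigitsCore]
    by_cases h : m / 10 = 0
    · simp only [h, if_true]
      rw [Nat.digits_def' (by norm_num : (1:Nat) < 10) hm, h]
      simp
    · simp only [h, if_false]
      have hd : m / 10 < m := Nat.div_lt_self hm (by norm_num)
      rw [ih (m / 10) _ (Nat.pos_of_ne_zero h) (by omega)]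
      rw [Nat.digits_def' (by norm_num : (1:Nat) < 10) hm]
      simp

theorem toChars_pos (m : Nat) (hm : 0 < m) :
    PySem.Int.toChars (m : Int) = ((Nat.digits 10 m).map Nat.digitChar).reverse := by
  rw [PySem.Int.toChars]
  rw [if_neg (by omega : ¬((m : Int) < 0))]
  rw [Int.toNat_natCast, Nat.toDigits]
  rw [toDigitsCore_eq (m + 1) m [] hm (by omega)]
  simp

theorem digitChar_mem_124 :
    ∀ d, d < 10 → ((Nat.digitChar d ∈ (['1', '2', '4'] : List Char)) ↔ (d = 1 ∨ d = 2 ∨ d = 4)) := by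
  decide

theorem digitChar_eq_one : ∀ d, d < 10 → (Nat.digitChar d = '1' ↔ d = 1) := by decide
theorem digitChar_eq_two : ∀ d, d < 10 → (Nat.digitChar d = '2' ↔ d = 2) := by decide
theorem digitChar_eq_four : ∀ d, d < 10 → (Nat.digitChar d = '4' ↔ d = 4) := by decide

-- A's test, characterised through Nat.digits
theorem validA_iff (m : Nat) :
    validA (m : Int) = true ↔
      m ≠ 0 ∧ (∀ d ∈ Nat.digits 10 m, d = 1 ∨ d = 2 ∨ d = 4) ∧
        ¬(1 ∈ Nat.digits 10 m ∧ 2 ∈ Nat.digits 10 m ∧ 4 ∈ Nat.digits 10 m) := by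
  rcases Nat.eq_zero_or_pos m with h0 | hm
  · subst h0
    constructor
    · intro h; exact absurd h (by decide)
    · rintro ⟨h, -⟩; exact absurd rfl h
  · have hchars := toChars_pos m hm
    have hlt : ∀ d ∈ Nat.digits 10 m, d < 10 :=
      fun d hd => Nat.digits_lt_base (by norm_num) hd
    have hv : validA (m : Int) =
        (PySem.Set.issubset (PySem.Set.ofList (PySem.Int.toChars (m : Int)))
            (PySem.Set.ofList ['1', '2', '4']) &&
          !PySem.Set.equal (PySem.Set.ofList (PySem.Int.toChars (m : Int)))
            (PySem.Set.ofList ['1', '2', '4'])) := rfl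
    have hmemc : ∀ c : Char,
        (c ∈ PySem.Set.ofList (PySem.Int.toChars (m : Int)) ↔
          ∃ d ∈ Nat.digits 10 m, Nat.digitChar d = c) := by
      intro c
      rw [PySem.Set.mem_ofList, hchars]
      simp [List.mem_reverse, List.mem_map]
    have hmemt : ∀ c : Char,
        (c ∈ PySem.Set.ofList (['1', '2', '4'] : List Char) ↔ (c = '1' ∨ c = '2' ∨ c = '4')) := by
      intro c
      rw [PySem.Set.mem_ofList]
      simp
    rw [hv, Bool.and_eq_true, Bool.not_eq_true']
    rw [PySem.Set.issubset_iff]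
    constructor
    · rintro ⟨hsub, hne⟩
      have hdig : ∀ d ∈ Nat.digits 10 m, d = 1 ∨ d = 2 ∨ d = 4 := by
        intro d hd
        have hc : Nat.digitChar d ∈ PySem.Set.ofList (PySem.Int.toChars (m : Int)) :=
          (hmemc _).2 ⟨d, hd, rfl⟩
        have := (hmemt _).1 (hsub _ hc)
        exact (digitChar_mem_124 d (hlt d hd)).1 (by simpa using this)
      refine ⟨by omega, hdig, ?_⟩
      rintro ⟨h1, h2, h4⟩
      have hfull : PySem.Set.equal (PySem.Set.ofList (PySem.Int.toChars (m : Int)))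
          (PySem.Set.ofList (['1', '2', '4'] : List Char)) = true := by
        rw [PySem.Set.equal_iff]
        intro c
        constructor
        · intro hc; exact hsub _ hc
        · intro hc
          rcases (hmemt c).1 hc with rfl | rfl | rfl
          · exact (hmemc _).2 ⟨1, h1, rfl⟩
          · exact (hmemc _).2 ⟨2, h2, rfl⟩
          · exact (hmemc _).2 ⟨4, h4, rfl⟩
      rw [hfull] at hne; exact absurd hne (by decide)
    · rintro ⟨-, hdig, hnfull⟩
      have hsub : ∀ c ∈ PySem.Set.ofList (PySem.Int.toChars (m : Int)),
          c ∈ PySem.Set.ofList (['1', '2', '4'] : List Char) := by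
        intro c hc
        obtain ⟨d, hd, rfl⟩ := (hmemc c).1 hc
        rw [hmemt]
        have := (digitChar_mem_124 d (hlt d hd)).2 (hdig d hd)
        simpa using this
      refine ⟨hsub, ?_⟩
      by_contra hne
      have heq : PySem.Set.equal (PySem.Set.ofList (PySem.Int.toChars (m : Int)))
          (PySem.Set.ofList (['1', '2', '4'] : List Char)) = true := by
        cases h : PySem.Set.equal (PySem.Set.ofList (PySem.Int.toChars (m : Int)))
            (PySem.Set.ofList (['1', '2', '4'] : List Char))
        · exact absurd h hne
        · rfl
      rw [PySem.Set.equal_iff] at heq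
      apply hnfull
      refine ⟨?_, ?_, ?_⟩
      · obtain ⟨d, hd, hdc⟩ := (hmemc '1').1 ((heq '1').2 ((hmemt '1').2 (by simp)))
        rwa [(digitChar_eq_one d (hlt d hd)).1 hdc] at hd
      · obtain ⟨d, hd, hdc⟩ := (hmemc '2').1 ((heq '2').2 ((hmemt '2').2 (by simp)))
        rwa [(digitChar_eq_two d (hlt d hd)).1 hdc] at hd
      · obtain ⟨d, hd, hdc⟩ := (hmemc '4').1 ((heq '4').2 ((hmemt '4').2 (by simp)))
        rwa [(digitChar_eq_four d (hlt d hd)).1 hdc] at hd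

theorem validA_vN (k : Nat) : (validA ((vN (k + 1) : Nat) : Int) = true) ↔ goodN (k + 1) := by
  rw [validA_iff, digits_vN]
  have hne : vN (k + 1) ≠ 0 := by
    have h := vN_strictMono (show 0 < k + 1 by omega)
    rw [vN_zero] at h; omega
  constructor
  · rintro ⟨-, -, h⟩; exact h
  · intro h; exact ⟨hne, fun d hd => to124N_mem hd, h⟩

theorem gap_invalid {k m : Nat} (h1 : vN k < m) (h2 : m < vN (k + 1)) :
    validA (m : Int) = false := by
  cases hv : validA (m : Int)
  · rfl
  · exfalso
    obtain ⟨hm0, hdig, -⟩ := (validA_iff m).1 hv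
    set j := idxN (Nat.digits 10 m) with hj
    have hto : to124N j = Nat.digits 10 m := to124N_idxN hdig
    have hvj : vN j = m := by rw [vN, hto, Nat.ofDigits_digits]
    have hk1 : k < j := vN_strictMono.lt_iff_lt.1 (by omega)
    have hk2 : j < k + 1 := vN_strictMono.lt_iff_lt.1 (by omega)
    omega

-- crossing a stretch of invalid numbers consumes one unit of fuel each
theorem aLoop_gap (n : Int) (d : Nat) :
    ∀ (f : Nat) (i : Int) (m : Nat), i ≠ n → (∀ j < d, validA ((m + j : Nat) : Int) = false) →
      aLoop n (d + f) i (m : Int) = aLoop n f i ((m + d : Nat) : Int) := by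
  induction d with
  | zero => intro f i m _ _; simp
  | succ d ih =>
    intro f i m hi hval
    have h0 : validA (m : Int) = false := by simpa using hval 0 (by omega)
    have e : d + 1 + f = (d + f) + 1 := by omega
    rw [e, aLoop]
    simp only [h0, if_false, Bool.false_eq_true]
    rw [if_neg hi]
    have e2 : (m : Int) + 1 = ((m + 1 : Nat) : Int) := by push_cast; ring
    rw [e2, ih f i (m + 1) hi (fun j hj => by
      have := hval (j + 1) (by omega)
      simpa [Nat.add_assoc, Nat.add_comm 1 j] using this)]
    congr 2
    omega

theorem aLoop_mono {n : Int} {f : Nat} {i num : Int} {x : Int}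
    (h : aLoop n f i num = some x) : aLoop n (f + 1) i num = some x := by
  induction f generalizing i num with
  | zero => simp [aLoop] at h
  | succ f ih =>
    rw [aLoop] at h ⊢
    by_cases hi : (if validA num then i + 1 else i) = n
    · rwa [if_pos hi] at h ⊢
    · rw [if_neg hi] at h ⊢; exact ih h

theorem aLoop_mono_le {n : Int} {f f' : Nat} {i num : Int} {x : Int}
    (hf : f ≤ f') (h : aLoop n f i num = some x) : aLoop n f' i num = some x := by
  induction f' with
  | zero =>
    have : f = 0 := by omega
    subst this; exact h
  | succ f' ih =>
    rcases Nat.lt_or_ge f (f' + 1) with hlt | hge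
    · exact aLoop_mono (ih (by omega))
    · have : f = f' + 1 := by omega
      subst this; exact h

theorem bLoop_mono {n : Int} {f : Nat} {c k : Int} {x : Int}
    (h : bLoop n f c k = some x) : bLoop n (f + 1) c k = some x := by
  induction f generalizing c k with
  | zero => simp [bLoop] at h
  | succ f ih =>
    rw [bLoop] at h ⊢
    by_cases hc : c < n
    · rw [if_pos hc] at h ⊢
      by_cases hfull : (1 ∈ digits124 (k + 1) ∧ 2 ∈ digits124 (k + 1) ∧ 4 ∈ digits124 (k + 1))
      · rw [if_pos hfull] at h ⊢; exact ih h
      · rw [if_neg hfull] at h ⊢; exact ih h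
    · rwa [if_neg hc] at h ⊢

theorem bLoop_mono_le {n : Int} {f f' : Nat} {c k : Int} {x : Int}
    (hf : f ≤ f') (h : bLoop n f c k = some x) : bLoop n f' c k = some x := by
  induction f' with
  | zero =>
    have : f = 0 := by omega
    subst this; exact h
  | succ f' ih =>
    rcases Nat.lt_or_ge f (f' + 1) with hlt | hge
    · exact bLoop_mono (ih (by omega))
    · have : f = f' + 1 := by omega
      subst this; exact h

theorem mem_map_natCast (a : Nat) (L : List Nat) :
    ((a : Int) ∈ L.map (Nat.cast : Nat → Int)) ↔ a ∈ L := by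
  simp

theorem full_iff (k : Nat) :
    (1 ∈ digits124 ((k : Int) + 1) ∧ 2 ∈ digits124 ((k : Int) + 1) ∧ 4 ∈ digits124 ((k : Int) + 1))
      ↔ ¬ goodN (k + 1) := by
  have e : (k : Int) + 1 = ((k + 1 : Nat) : Int) := by push_cast; ring
  rw [e, digits124_natCast]
  constructor
  · rintro ⟨h1, h2, h4⟩
    intro hg
    exact hg ⟨(mem_map_natCast 1 _).1 (by exact_mod_cast h1),
      (mem_map_natCast 2 _).1 (by exact_mod_cast h2),
      (mem_map_natCast 4 _).1 (by exact_mod_cast h4)⟩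
  · intro hng
    have := not_not.1 hng
    exact ⟨(mem_map_natCast 1 _).2 this.1, (mem_map_natCast 2 _).2 this.2.1,
      (mem_map_natCast 4 _).2 this.2.2⟩

-- the simulation: one B step corresponds to (gap + 1) A steps
theorem sim (n : Int) :
    ∀ (fB : Nat) (i : Int) (k : Nat) (res : Int),
      i < n → bLoop n fB i (k : Int) = some res →
      ∃ r : Nat, res = (r : Int) ∧ k < r ∧ r ≤ k + fB ∧
        aLoop n (vN r - vN k) i (((vN k + 1 : Nat) : Int)) = some ((vN r : Nat) : Int) := by
  intro fB
  induction fB with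
  | zero => intro i k res hi h; simp [bLoop] at h
  | succ fB ih =>
    intro i k res hi h
    rw [bLoop, if_pos hi] at h
    have hab : vN k < vN (k + 1) := vN_lt_succ k
    have hgapcross : ∀ (f : Nat) (i' : Int), i' ≠ n →
        aLoop n ((vN (k + 1) - vN k - 1) + f) i' (((vN k + 1 : Nat) : Int)) =
          aLoop n f i' ((vN (k + 1) : Nat) : Int) := by
      intro f i' hi'
      have := aLoop_gap n (vN (k + 1) - vN k - 1) f i' (vN k + 1) hi'
        (fun j hj => gap_invalid (k := k) (by omega) (by omega))
      rw [this]
      congr 2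
      omega
    by_cases hfull : (1 ∈ digits124 ((k : Int) + 1) ∧ 2 ∈ digits124 ((k : Int) + 1) ∧
        4 ∈ digits124 ((k : Int) + 1))
    · -- skipped index: not good
      rw [if_pos hfull] at h
      have hng : ¬ goodN (k + 1) := (full_iff k).1 hfull
      have e : (k : Int) + 1 = ((k + 1 : Nat) : Int) := by push_cast; ring
      rw [e] at h
      obtain ⟨r, hres, hkr, hrb, hA⟩ := ih i (k + 1) res hi h
      refine ⟨r, hres, by omega, by omega, ?_⟩
      have hbr : vN (k + 1) ≤ vN r := vN_strictMono.le_iff_le.2 (by omega)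
      have e2 : vN r - vN k = (vN (k + 1) - vN k - 1) + ((vN r - vN (k + 1)) + 1) := by omega
      rw [e2, hgapcross _ i (by omega)]
      rw [aLoop]
      have hv : validA ((vN (k + 1) : Nat) : Int) = false := by
        cases hval : validA ((vN (k + 1) : Nat) : Int)
        · rfl
        · exact absurd ((validA_vN k).1 hval) hng
      simp only [hv, Bool.false_eq_true, if_false]
      rw [if_neg (by omega : ¬(i = n))]
      have e3 : ((vN (k + 1) : Nat) : Int) + 1 = ((vN (k + 1) + 1 : Nat) : Int) := by
        push_cast; ring
      rw [e3]
      exact hA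
    · -- counted index: good
      rw [if_neg hfull] at h
      have hg : goodN (k + 1) := by
        intro hng
        exact hfull ((full_iff k).2 (not_not_intro hng))
      have hv : validA ((vN (k + 1) : Nat) : Int) = true := (validA_vN k).2 hg
      have e : (k : Int) + 1 = ((k + 1 : Nat) : Int) := by push_cast; ring
      rw [e] at h
      by_cases hin : i + 1 = n
      · -- the loop ends here: B returns k+1, A returns vN (k+1)
        -- peel one more step of bLoop to read off res
        match fB, h with
        | fB' + 1, h =>
          rw [bLoop, if_neg (by omega : ¬(i + 1 < n))] at h
          have hres : res = ((k + 1 : Nat) : Int) := by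
            exact (Option.some_inj.1 h).symm
          refine ⟨k + 1, hres, by omega, by omega, ?_⟩
          have e2 : vN (k + 1) - vN k = (vN (k + 1) - vN k - 1) + (0 + 1) := by omega
          rw [e2, hgapcross _ i (by omega)]
          rw [aLoop]
          simp only [hv, if_true]
          rw [if_pos hin]
      · -- loop continues with count+1
        obtain ⟨r, hres, hkr, hrb, hA⟩ := ih (i + 1) (k + 1) res (by omega) h
        refine ⟨r, hres, by omega, by omega, ?_⟩
        have hbr : vN (k + 1) ≤ vN r := vN_strictMono.le_iff_le.2 (by omega)
        have e2 : vN r - vN k = (vN (k + 1) - vN k - 1) + ((vN r - vN (k + 1)) + 1) := by omega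
        rw [e2, hgapcross _ i (by omega)]
        rw [aLoop]
        simp only [hv, if_true]
        rw [if_neg hin]
        have e3 : ((vN (k + 1) : Nat) : Int) + 1 = ((vN (k + 1) + 1 : Nat) : Int) := by
          push_cast; ring
        rw [e3]
        exact hA

def rep3 : Nat → Nat
  | 0 => 0
  | j + 1 => 3 * rep3 j + 1

theorem two_not_mem_rep3 (j : Nat) : 2 ∉ to124N (rep3 j) := by
  induction j with
  | zero => simp [rep3, to124N]
  | succ j ih =>
    have e : rep3 (j + 1) = (3 * rep3 j) + 1 := rfl
    rw [e, to124N]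
    have h1 : 3 * rep3 j % 3 = 0 := by omega
    have h2 : 3 * rep3 j / 3 = rep3 j := by omega
    simp [h1, h2, ih]

theorem goodN_rep3 (j : Nat) : goodN (rep3 j) := by
  rintro ⟨-, h2, -⟩
  exact two_not_mem_rep3 j h2

theorem rep3_lt_succ (j : Nat) : rep3 j < rep3 (j + 1) := by
  have e : rep3 (j + 1) = 3 * rep3 j + 1 := rfl
  omega

theorem rep3_strictMono : StrictMono rep3 := strictMono_nat_of_lt_succ rep3_lt_succ

theorem bLoop_adequate (n : Int) :
    ∀ (f : Nat) (c : Int) (k : Nat), 0 ≤ c → c < n →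
      (n - c).toNat ≤ ((Finset.Ioc k (k + f)).filter (fun j => goodN j)).card →
      (bLoop n (f + 1) c (k : Int)).isSome := by
  intro f
  induction f with
  | zero =>
    intro c k hc hcn hcard
    have he : Finset.Ioc k (k + 0) = ∅ := by simp
    rw [he] at hcard
    simp at hcard
    omega
  | succ f ih =>
    intro c k hc hcn hcard
    rw [bLoop, if_pos hcn]
    have hsplit : Finset.Ioc k (k + (f + 1)) = {k + 1} ∪ Finset.Ioc (k + 1) (k + 1 + f) := by
      have e1 : Finset.Ioc k (k + 1) = {k + 1} := by
        ext x
        simp only [Finset.mem_Ioc, Finset.mem_singleton]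
        omega
      rw [← e1, Finset.Ioc_union_Ioc_eq_Ioc (by omega) (by omega)]
      congr 1
      omega
    have hdisj : Disjoint ({k + 1} : Finset Nat) (Finset.Ioc (k + 1) (k + 1 + f)) := by
      simp [Finset.disjoint_singleton_left, Finset.mem_Ioc]
    have hcard2 : ((Finset.Ioc k (k + (f + 1))).filter (fun j => goodN j)).card =
        (({k + 1} : Finset Nat).filter (fun j => goodN j)).card +
          ((Finset.Ioc (k + 1) (k + 1 + f)).filter (fun j => goodN j)).card := by
      rw [hsplit, Finset.filter_union, Finset.card_union_of_disjoint
        (Finset.disjoint_filter_filter hdisj)]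
    by_cases hfull : (1 ∈ digits124 ((k : Int) + 1) ∧ 2 ∈ digits124 ((k : Int) + 1) ∧
        4 ∈ digits124 ((k : Int) + 1))
    · rw [if_pos hfull]
      have hng : ¬ goodN (k + 1) := (full_iff k).1 hfull
      have hsing : (({k + 1} : Finset Nat).filter (fun j => goodN j)).card = 0 := by
        rw [Finset.filter_singleton, if_neg hng]
        simp
      have e : (k : Int) + 1 = ((k + 1 : Nat) : Int) := by push_cast; ring
      rw [e]
      exact ih c (k + 1) hc hcn (by omega)
    · rw [if_neg hfull]
      have e : (k : Int) + 1 = ((k + 1 : Nat) : Int) := by push_cast; ring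
      rw [e]
      by_cases hcn2 : c + 1 < n
      · have hsing : (({k + 1} : Finset Nat).filter (fun j => goodN j)).card ≤ 1 :=
          le_trans (Finset.card_filter_le _ _) (by simp)
        exact ih (c + 1) (k + 1) (by omega) hcn2 (by omega)
      · rw [bLoop, if_neg hcn2]
        simp

theorem length_to124N_le : ∀ (j k : Nat), k ≤ rep3 j → (to124N k).length ≤ j := by
  intro j
  induction j with
  | zero =>
    intro k hk
    have : k = 0 := by
      have e : rep3 0 = 0 := rfl
      omega
    subst this; simp [to124N]
  | succ j ih =>
    intro k hk
    match k with
    | 0 => simp [to124N]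
    | k' + 1 =>
      rw [to124N]
      simp only [List.length_cons]
      have e : rep3 (j + 1) = 3 * rep3 j + 1 := rfl
      have hle : k' / 3 ≤ rep3 j := by omega
      have := ih (k' / 3) hle
      omega

theorem toInt124_map (L : List Nat) :
    toInt124 (L.map (Nat.cast : Nat → Int)) = ((Nat.ofDigits 10 L : Nat) : Int) := by
  induction L with
  | nil => rfl
  | cons d t ih =>
    have e : toInt124 ((d :: t).map (Nat.cast : Nat → Int)) =
        10 * toInt124 (t.map (Nat.cast : Nat → Int)) + (d : Int) := by
      show (((d :: t).map (Nat.cast : Nat → Int)).reverse.foldl (fun v x => 10 * v + x) 0) = _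
      rw [List.map_cons, List.reverse_cons, List.foldl_append]
      rfl
    rw [e, ih, Nat.ofDigits_cons]
    push_cast
    ring

theorem toInt124_digits124 (r : Nat) :
    toInt124 (digits124 (r : Int)) = ((vN r : Nat) : Int) := by
  rw [digits124_natCast, toInt124_map, vN]

theorem rep3_add_one_le (j : Nat) : rep3 j + 1 ≤ 3 ^ j := by
  induction j with
  | zero => simp [rep3]
  | succ j ih =>
    have e : rep3 (j + 1) = 3 * rep3 j + 1 := rfl
    have : (3 : Nat) ^ (j + 1) = 3 * 3 ^ j := by ring
    omega

theorem validA_zero : validA (0 : Int) = false := by decide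

-- ===== VERDICT (by name: the statement is the Claim_ definition above) =====
theorem solution_spec : Claim_equal_solution := by
  intro n _ hpre
  unfold Pre_solution at hpre
  unfold Spec_solution
  obtain ⟨nn, rfl⟩ : ∃ m : Nat, n = (m : Int) := ⟨n.toNat, by omega⟩
  by_cases hn0 : nn = 0
  · subst hn0
    have ha : solution ((0 : Nat) : Int) = 0 := by decide
    have hb : bLoop ((0 : Nat) : Int) (10 ^ (((0 : Nat) : Int).toNat + 1)) 0 0 = some 0 := by
      decide
    have hd : digits124 (0 : Int) = [] := by rw [digits124]; norm_num
    rw [ha, solution_alt, hb]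
    show (0 : Int) = toInt124 (digits124 0)
    rw [hd]
    rfl
  · -- n ≥ 1
    have hn1 : 1 ≤ nn := by omega
    -- adequacy of B with fuel rep3 nn + 1
    have hcard : (((nn : Int)) - 0).toNat ≤
        ((Finset.Ioc 0 (0 + rep3 nn)).filter (fun j => goodN j)).card := by
      have h2 : (((nn : Int)) - 0).toNat = nn := by omega
      rw [h2]
      have hinj : ∀ j ∈ Finset.range nn, rep3 (j + 1) ∈
          (Finset.Ioc 0 (0 + rep3 nn)).filter (fun j => goodN j) := by
        intro j hj
        rw [Finset.mem_filter, Finset.mem_Ioc]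
        refine ⟨⟨?_, ?_⟩, goodN_rep3 (j + 1)⟩
        · have h0 : rep3 0 < rep3 (j + 1) := rep3_strictMono (by omega)
          have e : rep3 0 = 0 := rfl
          omega
        · rw [Finset.mem_range] at hj
          have := rep3_strictMono.monotone (show j + 1 ≤ nn by omega)
          omega
      have := Finset.card_le_card_of_injOn (fun j => rep3 (j + 1)) hinj
        (fun a _ b _ hab => by
          have := rep3_strictMono.injective hab
          omega)
      rw [Finset.card_range] at this
      omega
    have hBsome := bLoop_adequate ((nn : Int)) (rep3 nn) 0 0 (le_refl 0) (by omega) hcard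
    obtain ⟨res, hres⟩ := Option.isSome_iff_exists.1 hBsome
    obtain ⟨r, hreq, hr0, hrb, hA⟩ := sim ((nn : Int)) (rep3 nn + 1) 0 0 res (by omega) hres
    -- fuel comparison
    have hfuelB : rep3 nn + 1 ≤ 10 ^ (nn + 1) := by
      have h1 := rep3_add_one_le nn
      have h2 : (3 : Nat) ^ nn ≤ 10 ^ nn := Nat.pow_le_pow_left (by norm_num) nn
      have h3 : (10 : Nat) ^ nn ≤ 10 ^ (nn + 1) := Nat.pow_le_pow_right (by norm_num) (by omega)
      omega
    -- value of B
    have hres' : bLoop ((nn : Int)) (rep3 nn + 1) 0 0 = some ((r : Nat) : Int) := by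
      rw [hreq] at hres
      simpa using hres
    have hBfull := bLoop_mono_le hfuelB hres'
    have hBval : solution_alt ((nn : Int)) = ((vN r : Nat) : Int) := by
      rw [solution_alt]
      simp only [Int.toNat_natCast]
      rw [hBfull]
      exact toInt124_digits124 r
    -- bound on vN r
    have hrlen : (to124N r).length ≤ nn + 1 := by
      apply length_to124N_le (nn + 1) r
      have e : rep3 (nn + 1) = 3 * rep3 nn + 1 := rfl
      omega
    have hvr : vN r < 10 ^ (nn + 1) := by
      have h1 : vN r < 10 ^ (to124N r).length := by
        rw [vN]
        exact Nat.ofDigits_lt_base_pow_length (by norm_num)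
          (fun x hx => by rcases to124N_mem hx with h | h | h <;> omega)
      have h2 : (10 : Nat) ^ (to124N r).length ≤ 10 ^ (nn + 1) :=
        Nat.pow_le_pow_right (by norm_num) hrlen
      omega
    -- A side
    have hone : 1 ≤ (10 : Nat) ^ (nn + 1) := Nat.one_le_pow _ _ (by norm_num)
    have hFa : (10 : Nat) ^ (nn + 1) = (10 ^ (nn + 1) - 1) + 1 := by omega
    have hAval : solution ((nn : Int)) = ((vN r : Nat) : Int) := by
      rw [solution]
      simp only [Int.toNat_natCast]
      rw [hFa, aLoop]
      simp only [validA_zero, Bool.false_eq_true, if_false]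
      rw [if_neg (show ¬((0 : Int) = (nn : Int)) by omega)]
      have hA' : aLoop ((nn : Int)) (vN r) 0 ((0 : Int) + 1) = some ((vN r : Nat) : Int) := by
        have h := hA
        rw [vN_zero] at h
        simpa using h
      have hAle := aLoop_mono_le (show vN r ≤ 10 ^ (nn + 1) - 1 by omega) hA'
      rw [hAle]
      rfl
    rw [hAval, hBval]
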